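-- pv_equiv track=rewrite | github.com/seiichikick0404/coding-problems | practice/C - Marks.py | compare_grades_optimized
-- ===== SOURCE A (Python) =====
-- def compare_grades_optimized(N, K, A):
--     results = []
--     prev_product = 1
--
--     # 最初のK個の要素の積を計算
--     for i in range(K):
--         prev_product *= A[i]
--
--     # K+1学期以降の評点を計算して比較
--     for i in range(K, N):
--         current_product = prev_product * A[i] // A[i - K]
--         if current_product > prev_product:
--             results.append("Yes")
--         else:
--             results.append("No")
--         prev_product = current_product
--
--     return results
-- ===== SOURCE B (Python) =====
-- def compare_grades_optimized(N, K, A):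
--     # The two compared window products share the K-1 overlapping marks; only the
--     # sign of that shared sub-product matters, so track a sliding zero count and
--     # negative-parity bit instead of the big-integer products themselves.
--     results = []
--     zeros = 0
--     neg_parity = 0
--     for j in range(1, K):          # overlap of the first comparison: A[1..K-1]
--         if A[j] == 0:
--             zeros += 1
--         elif A[j] < 0:
--             neg_parity ^= 1
--     for i in range(K, N):
--         if zeros:
--             results.append("No")
--         elif neg_parity == 0:
--             results.append("Yes" if A[i] > A[i - K] else "No")
--         else:
--             results.append("Yes" if A[i] < A[i - K] else "No")
--         if K > 1:                  # slide the overlap: add A[i], drop A[i-K+1]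
--             x = A[i]
--             if x == 0:
--                 zeros += 1
--             elif x < 0:
--                 neg_parity ^= 1
--             y = A[i - K + 1]
--             if y == 0:
--                 zeros -= 1
--             elif y < 0:
--                 neg_parity ^= 1
--     return results
-- ===== Notes on version B (the rewrite author's own statement) =====
-- stated objective: faster
-- what changed: B drops the running big-integer window product and its division entirely: only the sign of the K-1 overlapping marks shared by consecutive windows matters, so B keeps a sliding zero count and negative-parity bit and answers each query with a single element comparison A[i] vs A[i-K].
-- outside the precondition, e.g. on compare_grades_optimized(2, -1, [3, 4, 5]): A returns ['No', 'No', 'No'], B returns ['Yes', 'No', 'No']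
import Mathlib
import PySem

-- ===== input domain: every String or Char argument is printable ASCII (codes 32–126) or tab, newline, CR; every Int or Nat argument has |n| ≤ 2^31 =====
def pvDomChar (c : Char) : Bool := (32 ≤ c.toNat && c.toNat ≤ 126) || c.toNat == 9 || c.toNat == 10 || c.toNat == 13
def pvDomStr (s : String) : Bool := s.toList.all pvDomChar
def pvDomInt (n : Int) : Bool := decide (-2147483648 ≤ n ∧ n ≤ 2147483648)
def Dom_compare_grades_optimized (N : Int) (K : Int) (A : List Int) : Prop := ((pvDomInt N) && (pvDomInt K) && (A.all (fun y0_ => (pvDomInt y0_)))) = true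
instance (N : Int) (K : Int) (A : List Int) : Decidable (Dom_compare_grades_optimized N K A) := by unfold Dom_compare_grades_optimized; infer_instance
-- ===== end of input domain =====

-- B replaces A's running big-integer window products by a sliding zero-count and
-- negative-parity bit over the K-1 overlapping marks (objective: faster).

-- ===== PORT A =====
def compare_grades_optimized (N : Int) (K : Int) (A : List Int) : List String :=
  let prev_product : Int :=
    (PySem.List.pyRange 0 K 1).foldl (fun p i => p * PySem.List.pyGetD A i 0) 1
  ((PySem.List.pyRange K N 1).foldl
    (fun (st : List String × Int) i =>
      (st.1 ++ [if PySem.Int.floordiv (st.2 * PySem.List.pyGetD A i 0)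
                    (PySem.List.pyGetD A (i - K) 0) > st.2 then "Yes" else "No"],
       PySem.Int.floordiv (st.2 * PySem.List.pyGetD A i 0) (PySem.List.pyGetD A (i - K) 0)))
    ([], prev_product)).1

-- ===== PORT B =====
-- transliteration of Source B; 'neg_parity ^= 1' on the 0/1 bit is ported as '1 - p'
def compare_grades_optimized_alt (N : Int) (K : Int) (A : List Int) : List String :=
  let init : Int × Int :=
    (PySem.List.pyRange 1 K 1).foldl
      (fun (zp : Int × Int) j =>
        if PySem.List.pyGetD A j 0 = 0 then (zp.1 + 1, zp.2)
        else if PySem.List.pyGetD A j 0 < 0 then (zp.1, 1 - zp.2)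
        else zp)
      (0, 0)
  ((PySem.List.pyRange K N 1).foldl
    (fun (st : List String × Int × Int) i =>
      (st.1 ++ [if st.2.1 ≠ 0 then "No"
                else if st.2.2 = 0 then
                  (if PySem.List.pyGetD A i 0 > PySem.List.pyGetD A (i - K) 0 then "Yes" else "No")
                else
                  (if PySem.List.pyGetD A i 0 < PySem.List.pyGetD A (i - K) 0 then "Yes" else "No")],
       if 1 < K then
         let zp1 : Int × Int :=
           if PySem.List.pyGetD A i 0 = 0 then (st.2.1 + 1, st.2.2)
           else if PySem.List.pyGetD A i 0 < 0 then (st.2.1, 1 - st.2.2)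
           else st.2
         if PySem.List.pyGetD A (i - K + 1) 0 = 0 then (zp1.1 - 1, zp1.2)
         else if PySem.List.pyGetD A (i - K + 1) 0 < 0 then (zp1.1, 1 - zp1.2)
         else zp1
       else st.2))
    ([], init)).1

-- ===== PRECONDITION & SPEC =====
-- Pre_ excludes: negative K (A reads via Python negative-index wraparound, an accident of the
-- implementation), K or N beyond len(A) (IndexError), and inputs whose first N-K marks contain
-- a zero (A raises ZeroDivisionError when that mark leaves the window).
def Pre_compare_grades_optimized (N : Int) (K : Int) (A : List Int) : Prop :=
  0 ≤ K ∧ K ≤ (A.length : Int) ∧ N ≤ (A.length : Int) ∧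
    ∀ j ∈ List.range (N - K).toNat, A.getD j 0 ≠ 0
instance (N : Int) (K : Int) (A : List Int) : Decidable (Pre_compare_grades_optimized N K A) := by unfold Pre_compare_grades_optimized; infer_instance

def pvWitness_compare_grades_optimized : Int × Int × List Int := (4, 2, [1, -3, 2, 5])

def Spec_compare_grades_optimized (N : Int) (K : Int) (A : List Int) (out : List String) : Prop := out = compare_grades_optimized_alt N K A
instance (N : Int) (K : Int) (A : List Int) (out : List String) : Decidable (Spec_compare_grades_optimized N K A out) := by unfold Spec_compare_grades_optimized; infer_instance

-- ===== CLAIM (what is proved, stated in full; the proofs are below) =====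
def Claim_equal_compare_grades_optimized : Prop := ∀ (N : Int) (K : Int) (A : List Int), Dom_compare_grades_optimized N K A → Pre_compare_grades_optimized N K A → Spec_compare_grades_optimized N K A (compare_grades_optimized N K A)

-- ===== LEMMAS AND PROOFS =====

-- exact Python floor division for an exact multiple
theorem pv_floordiv_mul_cancel (a b : Int) (ha : a ≠ 0) :
    PySem.Int.floordiv (a * b) a = b := by
  unfold PySem.Int.floordiv
  exact Int.mul_fdiv_cancel_left b ha

theorem pv_prod_ne_zero (l : List Int) (h : ∀ x ∈ l, x ≠ 0) : l.prod ≠ 0 := by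
  induction l with
  | nil => simp
  | cons a t ih =>
      rw [List.prod_cons]
      exact mul_ne_zero (h a (by simp)) (ih (fun x hx => h x (by simp [hx])))

-- sign of a product of nonzero integers = parity of the number of negative factors
theorem pv_prod_pos_iff (l : List Int) (h : ∀ x ∈ l, x ≠ 0) :
    0 < l.prod ↔ l.countP (fun x => decide (x < 0)) % 2 = 0 := by
  induction l with
  | nil => simp
  | cons a t ih =>
      have ha : a ≠ 0 := h a (by simp)
      have htl : ∀ x ∈ t, x ≠ 0 := fun x hx => h x (by simp [hx])
      have htp : t.prod ≠ 0 := pv_prod_ne_zero t htl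
      have ihh := ih htl
      rw [List.prod_cons, List.countP_cons]
      rcases lt_or_gt_of_ne ha with hneg | hpos
      · have h1 : 0 < a * t.prod ↔ ¬ 0 < t.prod := by
          constructor
          · intro hp hq; nlinarith
          · intro hp
            have : t.prod < 0 := by omega
            nlinarith
        rw [h1, ihh]
        simp only [hneg, decide_true, if_true]
        omega
      · have h1 : 0 < a * t.prod ↔ 0 < t.prod := by
          constructor <;> intro hp <;> nlinarith
        rw [h1, ihh]
        have hna : ¬ a < 0 := by omega
        simp [hna]

-- pvW A k t = product of the window of k marks starting at t;
-- pvZ / pvNg = number of zeros / of negative marks in that window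
def pvW (A : List Int) (k t : Nat) : Int := ((A.drop t).take k).prod
def pvZ (A : List Int) (k t : Nat) : Nat := ((A.drop t).take k).countP (fun x => decide (x = 0))
def pvNg (A : List Int) (k t : Nat) : Nat := ((A.drop t).take k).countP (fun x => decide (x < 0))

theorem pv_take_head (A : List Int) (k t : Nat) (ht : t < A.length) :
    (A.drop t).take (k+1) = A.getD t 0 :: (A.drop (t+1)).take k := by
  rw [List.drop_eq_getElem_cons ht, List.take_succ_cons, List.getD_eq_getElem A 0 ht]

theorem pv_take_last (A : List Int) (k t : Nat) (ht : t + k < A.length) :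
    (A.drop t).take (k+1) = (A.drop t).take k ++ [A.getD (t+k) 0] := by
  rw [List.take_add_one]
  have h : (A.drop t)[k]? = some A[t+k] := by
    rw [List.getElem?_drop]
    exact List.getElem?_eq_getElem ht
  rw [h, List.getD_eq_getElem A 0 ht]
  rfl

theorem pvW_head (A : List Int) (k t : Nat) (ht : t < A.length) :
    pvW A (k+1) t = A.getD t 0 * pvW A k (t+1) := by
  unfold pvW; rw [pv_take_head A k t ht, List.prod_cons]

theorem pvW_last (A : List Int) (k t : Nat) (ht : t + k < A.length) :
    pvW A (k+1) t = pvW A k t * A.getD (t+k) 0 := by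
  unfold pvW; rw [pv_take_last A k t ht]; simp

-- the first loop of A computes the product of the first k marks
theorem pv_first_loop (A : List Int) (k : Nat) (hk : k ≤ A.length) :
    (PySem.List.pyRange 0 (k : Int) 1).foldl (fun p i => p * PySem.List.pyGetD A i 0) 1
      = pvW A k 0 := by
  induction k with
  | zero => simp [pvW, PySem.List.pyRange_one_eq_nil]
  | succ n ih =>
      have hcast : ((n + 1 : Nat) : Int) = (n : Int) + 1 := by push_cast; ring
      rw [hcast, PySem.List.pyRange_one_succ_right (by positivity), List.foldl_append]
      rw [ih (by omega)]
      simp only [List.foldl_cons, List.foldl_nil]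
      rw [PySem.List.pyGetD_natCast]
      have h2 : pvW A (n+1) 0 = pvW A n 0 * A.getD n 0 := by
        have := pvW_last A n 0 (by omega)
        simpa using this
      rw [h2]

-- the first loop of B computes the zero count and negative parity of A[1..j]
theorem pv_init_loop (A : List Int) (j : Nat) (hj : 1 + j ≤ A.length) :
    (PySem.List.pyRange 1 (1 + (j : Int)) 1).foldl
      (fun (zp : Int × Int) i =>
        if PySem.List.pyGetD A i 0 = 0 then (zp.1 + 1, zp.2)
        else if PySem.List.pyGetD A i 0 < 0 then (zp.1, 1 - zp.2)
        else zp)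
      (0, 0)
    = ((pvZ A j 1 : Int), (((pvNg A j 1) % 2 : Nat) : Int)) := by
  induction j with
  | zero => simp [pvZ, pvNg, PySem.List.pyRange_one_eq_nil]
  | succ n ih =>
      have hcast : (1 + ((n + 1 : Nat) : Int)) = (1 + (n : Int)) + 1 := by push_cast; ring
      rw [hcast, PySem.List.pyRange_one_succ_right (by omega), List.foldl_append, ih (by omega)]
      simp only [List.foldl_cons, List.foldl_nil]
      have hidx : 1 + n < A.length := by omega
      have e : PySem.List.pyGetD A (1 + (n : Int)) 0 = A.getD (1 + n) 0 := by
        have h : (1 + (n : Int)) = ((1 + n : Nat) : Int) := by push_cast; ring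
        rw [h, PySem.List.pyGetD_natCast]
      have hz : pvZ A (n+1) 1 = pvZ A n 1 + (if A.getD (1+n) 0 = 0 then 1 else 0) := by
        unfold pvZ
        rw [pv_take_last A n 1 hidx, List.countP_append]
        simp [List.countP_cons]
      have hn : pvNg A (n+1) 1 = pvNg A n 1 + (if A.getD (1+n) 0 < 0 then 1 else 0) := by
        unfold pvNg
        rw [pv_take_last A n 1 hidx, List.countP_append]
        simp [List.countP_cons]
      rw [e, hz, hn]
      split_ifs <;> simp only [Prod.mk.injEq] <;> constructor <;> omega

-- one step of A's main loop: the division is exact (the outgoing mark divides the product)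
theorem pv_step (A : List Int) (k' t : Nat) (hA : A.getD t 0 ≠ 0)
    (ht : t + (k' + 1) < A.length) :
    PySem.Int.floordiv (pvW A (k'+1) t * A.getD (t + (k'+1)) 0) (A.getD t 0)
      = pvW A (k'+1) (t+1) := by
  have ht0 : t < A.length := by omega
  have h1 : pvW A (k'+1) t = A.getD t 0 * pvW A k' (t+1) := pvW_head A k' t ht0
  have h2 : pvW A (k'+1) (t+1) = pvW A k' (t+1) * A.getD (t + (k'+1)) 0 := by
    have h := pvW_last A k' (t+1) (by omega)
    rw [show t + 1 + k' = t + (k' + 1) from by omega] at h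
    exact h
  rw [h1, h2, mul_assoc]
  exact pv_floordiv_mul_cancel _ _ hA

-- B's branch on (zero count, negative parity) decides exactly "did the window product grow"
theorem pv_emit (A : List Int) (k' t : Nat) (ht : t + (k' + 1) < A.length) :
    (if ((pvZ A k' (t+1) : Int)) ≠ 0 then "No"
     else if (((pvNg A k' (t+1)) % 2 : Nat) : Int) = 0 then
       (if A.getD (t + (k'+1)) 0 > A.getD t 0 then "Yes" else "No")
     else
       (if A.getD (t + (k'+1)) 0 < A.getD t 0 then "Yes" else "No"))
    = (if pvW A (k'+1) (t+1) > pvW A (k'+1) t then "Yes" else "No") := by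
  have ht0 : t < A.length := by omega
  have h1 : pvW A (k'+1) t = A.getD t 0 * pvW A k' (t+1) := pvW_head A k' t ht0
  have h2 : pvW A (k'+1) (t+1) = pvW A k' (t+1) * A.getD (t + (k'+1)) 0 := by
    have h := pvW_last A k' (t+1) (by omega)
    rw [show t + 1 + k' = t + (k' + 1) from by omega] at h
    exact h
  by_cases hz : pvZ A k' (t+1) = 0
  · -- no zero in the overlap window
    have hz' : ((A.drop (t+1)).take k').countP (fun x => decide (x = 0)) = 0 := hz
    have hnz : ∀ x ∈ (A.drop (t+1)).take k', x ≠ 0 := by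
      intro x hx hx0
      have hcp := (List.countP_eq_zero.mp hz') x hx
      simp [hx0] at hcp
    have hCnz : pvW A k' (t+1) ≠ 0 := pv_prod_ne_zero _ hnz
    have hsign := pv_prod_pos_iff _ hnz
    rw [if_neg (show ¬((pvZ A k' (t+1) : Int) ≠ 0) from by simp [hz])]
    by_cases hp : (pvNg A k' (t+1)) % 2 = 0
    · have hCpos : 0 < pvW A k' (t+1) := hsign.mpr hp
      rw [if_pos (by exact_mod_cast hp)]
      have hiff : (pvW A (k'+1) (t+1) > pvW A (k'+1) t) ↔
          (A.getD (t + (k'+1)) 0 > A.getD t 0) := by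
        rw [h1, h2]
        constructor <;> intro hh <;> nlinarith
      rw [if_congr hiff rfl rfl]
    · have hCneg : pvW A k' (t+1) < 0 := by
        have : ¬ 0 < pvW A k' (t+1) := fun h => hp (hsign.mp h)
        omega
      rw [if_neg (by exact_mod_cast hp)]
      have hiff : (pvW A (k'+1) (t+1) > pvW A (k'+1) t) ↔
          (A.getD (t + (k'+1)) 0 < A.getD t 0) := by
        rw [h1, h2]
        constructor <;> intro hh <;> nlinarith
      rw [if_congr hiff rfl rfl]
  · -- a zero in the overlap: both window products are 0
    have hC0 : pvW A k' (t+1) = 0 := by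
      have hex : ∃ x ∈ (A.drop (t+1)).take k', x = 0 := by
        by_contra hno
        exact hz (List.countP_eq_zero.mpr (fun a ha => by
          simp only [decide_eq_true_eq]
          exact fun h0 => hno ⟨a, ha, h0⟩))
      obtain ⟨x, hx, rfl⟩ := hex
      exact List.prod_eq_zero hx
    rw [if_pos (Int.natCast_ne_zero.mpr hz), h1, h2, hC0]
    simp

-- A's main loop, unrolled from the right
theorem pv_main_loop_A (A : List Int) (k' : Nat) (K : Int) (hK : K = ((k' + 1 : Nat) : Int)) :
    ∀ (m : Nat), (k' + 1) + m ≤ A.length → (∀ t < m, A.getD t 0 ≠ 0) →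
    (PySem.List.pyRange K (K + (m : Int)) 1).foldl
      (fun (st : List String × Int) i =>
        (st.1 ++ [if PySem.Int.floordiv (st.2 * PySem.List.pyGetD A i 0)
                      (PySem.List.pyGetD A (i - K) 0) > st.2 then "Yes" else "No"],
         PySem.Int.floordiv (st.2 * PySem.List.pyGetD A i 0) (PySem.List.pyGetD A (i - K) 0)))
      ([], pvW A (k'+1) 0)
    = ((List.range m).map (fun t =>
        if pvW A (k'+1) (t+1) > pvW A (k'+1) t then "Yes" else "No"), pvW A (k'+1) m) := by
  intro m
  induction m with
  | zero => intro _ _; simp [PySem.List.pyRange_one_eq_nil]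
  | succ n ih =>
      intro hlen hnz
      have hcast : (K + ((n + 1 : Nat) : Int)) = (K + (n : Int)) + 1 := by push_cast; ring
      rw [hcast, PySem.List.pyRange_one_succ_right (by omega), List.foldl_append,
        ih (by omega) (fun t ht => hnz t (by omega))]
      simp only [List.foldl_cons, List.foldl_nil]
      have hidx : n + (k' + 1) < A.length := by omega
      have e1 : PySem.List.pyGetD A (K + (n : Int)) 0 = A.getD (n + (k'+1)) 0 := by
        have h : K + (n : Int) = ((n + (k'+1) : Nat) : Int) := by rw [hK]; push_cast; ring
        rw [h, PySem.List.pyGetD_natCast]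
      have e2 : PySem.List.pyGetD A (K + (n : Int) - K) 0 = A.getD n 0 := by
        have h : K + (n : Int) - K = ((n : Nat) : Int) := by ring
        rw [h, PySem.List.pyGetD_natCast]
      rw [e1, e2, pv_step A k' n (hnz n (by omega)) hidx, List.range_succ, List.map_append]
      rfl

-- B's main loop, unrolled from the right (the sliding counts stay in sync with the window)
theorem pv_main_loop_B (A : List Int) (k' : Nat) (K : Int) (hK : K = ((k' + 1 : Nat) : Int)) :
    ∀ (m : Nat), (k' + 1) + m ≤ A.length →
    (PySem.List.pyRange K (K + (m : Int)) 1).foldl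
      (fun (st : List String × Int × Int) i =>
        (st.1 ++ [if st.2.1 ≠ 0 then "No"
                  else if st.2.2 = 0 then
                    (if PySem.List.pyGetD A i 0 > PySem.List.pyGetD A (i - K) 0 then "Yes" else "No")
                  else
                    (if PySem.List.pyGetD A i 0 < PySem.List.pyGetD A (i - K) 0 then "Yes" else "No")],
         if 1 < K then
           let zp1 : Int × Int :=
             if PySem.List.pyGetD A i 0 = 0 then (st.2.1 + 1, st.2.2)
             else if PySem.List.pyGetD A i 0 < 0 then (st.2.1, 1 - st.2.2)
             else st.2
           if PySem.List.pyGetD A (i - K + 1) 0 = 0 then (zp1.1 - 1, zp1.2)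
           else if PySem.List.pyGetD A (i - K + 1) 0 < 0 then (zp1.1, 1 - zp1.2)
           else zp1
         else st.2))
      ([], ((pvZ A k' 1 : Int), (((pvNg A k' 1) % 2 : Nat) : Int)))
    = ((List.range m).map (fun t =>
        if pvW A (k'+1) (t+1) > pvW A (k'+1) t then "Yes" else "No"),
       ((pvZ A k' (m+1) : Int), (((pvNg A k' (m+1)) % 2 : Nat) : Int))) := by
  intro m
  induction m with
  | zero => simp [PySem.List.pyRange_one_eq_nil]
  | succ n ih =>
      intro hlen
      have hcast : (K + ((n + 1 : Nat) : Int)) = (K + (n : Int)) + 1 := by push_cast; ring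
      rw [hcast, PySem.List.pyRange_one_succ_right (by omega), List.foldl_append, ih (by omega)]
      simp only [List.foldl_cons, List.foldl_nil]
      have hidx : n + (k' + 1) < A.length := by omega
      have e1 : PySem.List.pyGetD A (K + (n : Int)) 0 = A.getD (n + (k'+1)) 0 := by
        have h : K + (n : Int) = ((n + (k'+1) : Nat) : Int) := by rw [hK]; push_cast; ring
        rw [h, PySem.List.pyGetD_natCast]
      have e2 : PySem.List.pyGetD A (K + (n : Int) - K) 0 = A.getD n 0 := by
        have h : K + (n : Int) - K = ((n : Nat) : Int) := by ring
        rw [h, PySem.List.pyGetD_natCast]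
      have e3 : PySem.List.pyGetD A (K + (n : Int) - K + 1) 0 = A.getD (n+1) 0 := by
        have h : K + (n : Int) - K + 1 = ((n + 1 : Nat) : Int) := by push_cast; ring
        rw [h, PySem.List.pyGetD_natCast]
      rw [e1, e2, e3]
      simp only [Prod.mk.injEq]
      constructor
      · rw [List.range_succ, List.map_append]
        rw [pv_emit A k' n hidx]
        rfl
      · -- the slide keeps the counts of the overlap window in sync
        rcases Nat.eq_zero_or_pos k' with hk0 | hkpos
        · -- K = 1: overlap window is empty, no slide
          subst hk0
          have hKK : ¬ (1:Int) < K := by rw [hK]; omega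
          rw [if_neg hKK]
          simp [pvZ, pvNg]
        · obtain ⟨k'', rfl⟩ : ∃ k'', k' = k'' + 1 := ⟨k' - 1, by omega⟩
          have hKK : (1:Int) < K := by rw [hK]; push_cast; omega
          rw [if_pos hKK]
          have hy : n + 1 < A.length := by omega
          have hxi : (n + 1 + 1) + k'' < A.length := by omega
          have hzh : pvZ A (k''+1) (n+1)
              = (if A.getD (n+1) 0 = 0 then 1 else 0) + pvZ A k'' (n+1+1) := by
            unfold pvZ
            rw [pv_take_head A k'' (n+1) hy, List.countP_cons]
            simp only [decide_eq_true_eq]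
            omega
          have hnh : pvNg A (k''+1) (n+1)
              = (if A.getD (n+1) 0 < 0 then 1 else 0) + pvNg A k'' (n+1+1) := by
            unfold pvNg
            rw [pv_take_head A k'' (n+1) hy, List.countP_cons]
            simp only [decide_eq_true_eq]
            omega
          have hzl : pvZ A (k''+1) (n+1+1)
              = pvZ A k'' (n+1+1) + (if A.getD (n + (k''+1+1)) 0 = 0 then 1 else 0) := by
            unfold pvZ
            rw [pv_take_last A k'' (n+1+1) hxi, List.countP_append,
              show n + 1 + 1 + k'' = n + (k''+1+1) from by omega]
            simp [List.countP_cons]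
          have hnl : pvNg A (k''+1) (n+1+1)
              = pvNg A k'' (n+1+1) + (if A.getD (n + (k''+1+1)) 0 < 0 then 1 else 0) := by
            unfold pvNg
            rw [pv_take_last A k'' (n+1+1) hxi, List.countP_append,
              show n + 1 + 1 + k'' = n + (k''+1+1) from by omega]
            simp [List.countP_cons]
          rw [hzh, hnh, hzl, hnl]
          split_ifs <;> simp only [Prod.mk.injEq] <;> constructor <;> omega

-- K = 0: A's quotient is always 1 (prev stays 1), B's state stays (0,0); every answer is "No"
theorem pv_loop_A_K0 (A : List Int) :
    ∀ (m : Nat) (st : List String), (∀ t < m, A.getD t 0 ≠ 0) → (m ≤ A.length) →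
    (PySem.List.pyRange 0 ((m : Nat) : Int) 1).foldl
      (fun (st : List String × Int) i =>
        (st.1 ++ [if PySem.Int.floordiv (st.2 * PySem.List.pyGetD A i 0)
                      (PySem.List.pyGetD A (i - 0) 0) > st.2 then "Yes" else "No"],
         PySem.Int.floordiv (st.2 * PySem.List.pyGetD A i 0) (PySem.List.pyGetD A (i - 0) 0)))
      (st, 1)
    = (st ++ (List.range m).map (fun _ => "No"), 1) := by
  intro m
  induction m with
  | zero => intro st _ _; simp [PySem.List.pyRange_one_eq_nil]
  | succ n ih =>
      intro st hnz hlen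
      have hcast : ((n + 1 : Nat) : Int) = ((n : Nat) : Int) + 1 := by push_cast; ring
      rw [hcast, PySem.List.pyRange_one_succ_right (by positivity), List.foldl_append,
        ih st (fun t ht => hnz t (by omega)) (by omega)]
      simp only [List.foldl_cons, List.foldl_nil]
      have e : PySem.List.pyGetD A ((n : Nat) : Int) 0 = A.getD n 0 := PySem.List.pyGetD_natCast A n 0
      have e2 : PySem.List.pyGetD A (((n : Nat) : Int) - 0) 0 = A.getD n 0 := by
        rw [show ((n : Nat) : Int) - 0 = ((n : Nat) : Int) from by ring]; exact e
      rw [e, e2]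
      have hdiv : PySem.Int.floordiv (1 * A.getD n 0) (A.getD n 0) = 1 := by
        rw [show (1 : Int) * A.getD n 0 = A.getD n 0 * 1 from by ring]
        exact pv_floordiv_mul_cancel _ _ (hnz n (by omega))
      rw [hdiv, if_neg (by omega), List.range_succ, List.map_append, ← List.append_assoc]
      rfl

theorem pv_loop_B_K0 (A : List Int) :
    ∀ (m : Nat) (st : List String),
    (PySem.List.pyRange 0 ((m : Nat) : Int) 1).foldl
      (fun (st : List String × Int × Int) i =>
        (st.1 ++ [if st.2.1 ≠ 0 then "No"
                  else if st.2.2 = 0 then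
                    (if PySem.List.pyGetD A i 0 > PySem.List.pyGetD A (i - 0) 0 then "Yes" else "No")
                  else
                    (if PySem.List.pyGetD A i 0 < PySem.List.pyGetD A (i - 0) 0 then "Yes" else "No")],
         if (1 : Int) < 0 then
           let zp1 : Int × Int :=
             if PySem.List.pyGetD A i 0 = 0 then (st.2.1 + 1, st.2.2)
             else if PySem.List.pyGetD A i 0 < 0 then (st.2.1, 1 - st.2.2)
             else st.2
           if PySem.List.pyGetD A (i - 0 + 1) 0 = 0 then (zp1.1 - 1, zp1.2)
           else if PySem.List.pyGetD A (i - 0 + 1) 0 < 0 then (zp1.1, 1 - zp1.2)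
           else zp1
         else st.2))
      (st, 0, 0)
    = (st ++ (List.range m).map (fun _ => "No"), 0, 0) := by
  intro m
  induction m with
  | zero => intro st; simp [PySem.List.pyRange_one_eq_nil]
  | succ n ih =>
      intro st
      have hcast : ((n + 1 : Nat) : Int) = ((n : Nat) : Int) + 1 := by push_cast; ring
      rw [hcast, PySem.List.pyRange_one_succ_right (by positivity), List.foldl_append, ih st]
      simp only [List.foldl_cons, List.foldl_nil]
      rw [show ((n : Nat) : Int) - 0 = ((n : Nat) : Int) from by ring]
      simp [List.range_succ, List.append_assoc]

-- ===== VERDICT (by name: the statement is the Claim_ definition above) =====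
theorem compare_grades_optimized_spec : Claim_equal_compare_grades_optimized := by
  intro N K A _ hpre
  obtain ⟨hK0, hKlen, hNlen, hnz0⟩ := hpre
  have hnz : ∀ t < (N - K).toNat, A.getD t 0 ≠ 0 := by
    intro t ht
    exact hnz0 t (List.mem_range.mpr ht)
  unfold Spec_compare_grades_optimized compare_grades_optimized compare_grades_optimized_alt
  by_cases hNK : N ≤ K
  · rw [PySem.List.pyRange_one_eq_nil hNK]
    simp
  · obtain ⟨m, hm⟩ : ∃ m : Nat, N = K + (m : Int) := ⟨(N - K).toNat, by omega⟩
    have hmval : ((N - K).toNat : Int) = (m : Int) := by omega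
    rcases eq_or_lt_of_le hK0 with hKz | hKpos
    · -- K = 0
      have hK : K = 0 := hKz.symm
      subst hK
      simp only [hm, zero_add]
      rw [show PySem.List.pyRange 0 0 1 = [] from PySem.List.pyRange_one_eq_nil (by omega),
        show PySem.List.pyRange 1 0 1 = [] from PySem.List.pyRange_one_eq_nil (by omega)]
      simp only [List.foldl_nil]
      rw [pv_loop_A_K0 A m [] (by intro t ht; exact hnz t (by omega)) (by omega),
        pv_loop_B_K0 A m []]
    · -- K ≥ 1
      obtain ⟨k', hk'⟩ : ∃ k' : Nat, K = ((k' + 1 : Nat) : Int) := ⟨(K - 1).toNat, by omega⟩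
      have hfirst := pv_first_loop A (k' + 1) (by omega)
      rw [← hk'] at hfirst
      have hinit := pv_init_loop A k' (by omega)
      rw [show (1 + (k' : Int)) = K from by rw [hk']; push_cast; ring] at hinit
      have hA := pv_main_loop_A A k' K hk' m (by omega)
        (by intro t ht; exact hnz t (by omega))
      have hB := pv_main_loop_B A k' K hk' m (by omega)
      simp only [hm, hfirst, hinit]
      rw [hA, hB]
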